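-- pv_equiv track=rewrite | github.com/tplews98/advent_of_code_2022 | days/day_01.py | parse_text_into_bundles
-- ===== SOURCE A (Python) =====
-- def parse_text_into_bundles(lines: list[str]) -> list[list[int]]:
--     bundles: list[list[int]] = []
--     current_bundle = []
--     for line in lines:
--         line = line.strip()
--         if line:
--             # Part of same bundle.
--             current_bundle.append(int(line))
--         elif current_bundle:
--             # Current line is empty so bundle has finished, add it to list and
--             # reset current bundle.
--             bundles.append(current_bundle)
--             current_bundle = []
--
--     # Add final bundle if there was no newline at end of file.
--     if current_bundle:
--         bundles.append(current_bundle)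
--
--     return bundles
-- ===== SOURCE B (Python) =====
-- def parse_text_into_bundles(lines: list[str]) -> list[list[int]]:
--     stripped = [line.strip() for line in lines]
--     bundles: list[list[int]] = []
--     i, n = 0, len(stripped)
--     while i < n:
--         if stripped[i]:
--             # Scan forward to the end of this run of non-blank lines.
--             j = i
--             while j < n and stripped[j]:
--                 j += 1
--             bundles.append([int(x) for x in stripped[i:j]])
--             i = j
--         else:
--             i += 1
--     return bundles
-- ===== Notes on version B (the rewrite author's own statement) =====
-- stated objective: alternative
-- what changed: B strips all lines up front and then finds each bundle as a whole run of non-blank lines with a forward scan (two-pointer run finding), instead of A's element-by-element accumulator with flush-on-blank and flush-at-end branches.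
import Mathlib
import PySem

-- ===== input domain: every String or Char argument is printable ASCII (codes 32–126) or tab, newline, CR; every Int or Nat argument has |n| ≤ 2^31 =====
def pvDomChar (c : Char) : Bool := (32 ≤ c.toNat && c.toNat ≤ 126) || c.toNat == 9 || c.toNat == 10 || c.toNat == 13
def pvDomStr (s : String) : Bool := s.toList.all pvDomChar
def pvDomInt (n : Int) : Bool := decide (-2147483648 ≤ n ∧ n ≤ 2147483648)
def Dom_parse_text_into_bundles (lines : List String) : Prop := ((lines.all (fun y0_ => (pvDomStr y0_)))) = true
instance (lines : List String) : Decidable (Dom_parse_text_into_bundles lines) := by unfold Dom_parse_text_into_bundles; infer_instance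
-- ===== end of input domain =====

-- B finds each bundle as a whole run of non-blank stripped lines with a forward scan,
-- instead of A's accumulator with flush-on-blank / flush-at-end branches (alternative, same cost).


-- int(t) for an already guaranteed-parsable t (Pre_ excludes the ValueError inputs)
def pvIntD (t : String) : Int := (PySem.Int.ofStr? t).getD 0

-- truthiness of a (stripped) string
def pvNB (t : String) : Bool := !t.toList.isEmpty

-- ===== PORT A =====
-- loop body of A (line already replaced by line.strip() before the tests)
def pvStepS (acc : List (List Int) × List Int) (t : String) : List (List Int) × List Int :=
  if pvNB t then (acc.1, acc.2 ++ [pvIntD t])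
  else if !acc.2.isEmpty then (acc.1 ++ [acc.2], [])
  else acc

def pvStepA (acc : List (List Int) × List Int) (line : String) : List (List Int) × List Int :=
  pvStepS acc (PySem.Str.strip line)

-- final flush: add the last bundle if non-empty
def pvFinish (acc : List (List Int) × List Int) : List (List Int) :=
  if !acc.2.isEmpty then acc.1 ++ [acc.2] else acc.1

def parse_text_into_bundles (lines : List String) : List (List Int) :=
  pvFinish (lines.foldl pvStepA ([], []))

-- ===== PORT B =====
-- run finder over the stripped lines: skip blanks; at a non-blank line take the whole
-- run of non-blank lines as one bundle, continue after it
def pvAltGo : List String → List (List Int)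
  | [] => []
  | t :: rest =>
    if pvNB t then
      ((t :: rest.takeWhile pvNB).map pvIntD) :: pvAltGo (rest.dropWhile pvNB)
    else
      pvAltGo rest
termination_by ts => ts.length
decreasing_by
  · exact Nat.lt_succ_of_le (List.length_dropWhile_le pvNB rest)
  · simp

def parse_text_into_bundles_alt (lines : List String) : List (List Int) :=
  pvAltGo (lines.map PySem.Str.strip)

-- ===== PRECONDITION & SPEC =====
-- Pre_: every non-blank stripped line parses as a Python int (otherwise A raises ValueError).
def Pre_parse_text_into_bundles (lines : List String) : Prop :=
  (lines.all fun s =>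
    (PySem.Str.strip s).toList.isEmpty || (PySem.Int.ofStr? (PySem.Str.strip s)).isSome) = true
instance (lines : List String) : Decidable (Pre_parse_text_into_bundles lines) := by
  unfold Pre_parse_text_into_bundles; infer_instance

def pvWitness_parse_text_into_bundles : List String := [" 1 ", "+2", "", "", "3", "4"]

def Spec_parse_text_into_bundles (lines : List String) (out : List (List Int)) : Prop :=
  out = parse_text_into_bundles_alt lines
instance (lines : List String) (out : List (List Int)) : Decidable (Spec_parse_text_into_bundles lines out) := by
  unfold Spec_parse_text_into_bundles; infer_instance

-- ===== CLAIM (what is proved, stated in full; the proofs are below) =====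
def Claim_equal_parse_text_into_bundles : Prop :=
  ∀ (lines : List String), Dom_parse_text_into_bundles lines →
    Pre_parse_text_into_bundles lines →
    Spec_parse_text_into_bundles lines (parse_text_into_bundles lines)

-- ===== LEMMAS AND PROOFS =====

-- A's remaining computation as a recursion on the stripped suffix, with pending bundle c
def pvRun (c : List Int) : List String → List (List Int)
  | [] => if !c.isEmpty then [c] else []
  | t :: ts =>
    if pvNB t then pvRun (c ++ [pvIntD t]) ts
    else if !c.isEmpty then c :: pvRun [] ts
    else pvRun c ts

theorem pvFoldl_eq_run (ts : List String) :
    ∀ b c, pvFinish (ts.foldl pvStepS (b, c)) = b ++ pvRun c ts := by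
  induction ts with
  | nil => intro b c; simp [pvFinish, pvRun]; split <;> simp
  | cons t ts ih =>
    intro b c
    by_cases h : pvNB t
    · simp [pvStepS, pvRun, h, ih]
    · by_cases hc : c.isEmpty
      · simp [pvStepS, pvRun, h, hc, ih]
      · simp [pvStepS, pvRun, h, hc, ih]

theorem pvRun_eq_altGo (ts : List String) :
    pvRun [] ts = pvAltGo ts ∧
      ∀ c, ¬ c.isEmpty → pvRun c ts =
        (c ++ (ts.takeWhile pvNB).map pvIntD) :: pvAltGo (ts.dropWhile pvNB) := by
  induction ts with
  | nil =>
    constructor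
    · simp [pvRun, pvAltGo]
    · intro c hc; simp [pvRun, pvAltGo, hc]
  | cons t ts ih =>
    obtain ⟨ih0, ihc⟩ := ih
    by_cases h : pvNB t
    · constructor
      · rw [pvAltGo]
        simp only [pvRun, h, if_pos]
        rw [List.nil_append, ihc [pvIntD t] (by simp)]
        simp
      · intro c hc
        simp only [pvRun, h, if_pos]
        rw [ihc (c ++ [pvIntD t]) (by simp)]
        simp [h]
    · constructor
      · rw [pvAltGo]; simp [pvRun, h, ih0]
      · intro c hc
        have hc' : (!c.isEmpty) = true := by simp_all
        rw [pvRun]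
        simp only [h, Bool.false_eq_true, if_false, hc', if_pos, ih0]
        rw [List.takeWhile_cons_of_neg (by simp [h]), List.dropWhile_cons_of_neg (by simp [h])]
        rw [pvAltGo]
        simp [h]

-- ===== VERDICT (by name: the statement is the Claim_ definition above) =====
theorem parse_text_into_bundles_spec : Claim_equal_parse_text_into_bundles := by
  intro lines _ _
  unfold Spec_parse_text_into_bundles parse_text_into_bundles parse_text_into_bundles_alt
  have h1 : lines.foldl pvStepA ([], []) = (lines.map PySem.Str.strip).foldl pvStepS ([], []) := by
    rw [List.foldl_map]; rfl
  rw [h1, pvFoldl_eq_run, (pvRun_eq_altGo _).1]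
  simp
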